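-- pv_equiv track=rewrite | github.com/SayadPervez/finalYearProject | hardwareImplementations/mySorter.py | segregater
-- ===== SOURCE A (Python) =====
-- def segregater(a0a): # array of arrays
--
--     array0categories = []
--
--     for arr in a0a:
--         category = None
--         lessThan4250 = len([_ for _ in arr if _ < 4250])
--         moreThan10_000 = len([_ for _ in arr if _ > 10_000])
--         commonFreq = len([_ for _ in arr if 4250<=_<=10_000])
--
--         if(lessThan4250>0):
--             category = "A"
--         elif(moreThan10_000>0):
--             category = "C"
--         elif(commonFreq>0):
--             category = "B"
--
--         array0categories.append(category)
--
--     return(array0categories)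
-- ===== SOURCE B (Python) =====
-- def segregater(a0a):  # single pass per sub-array maintaining presence flags
--     out = []
--     for arr in a0a:
--         hasLow = hasHigh = hasMid = False
--         for x in arr:
--             if x < 4250:
--                 hasLow = True
--             elif x > 10_000:
--                 hasHigh = True
--             else:
--                 hasMid = True
--         if hasLow:
--             out.append("A")
--         elif hasHigh:
--             out.append("C")
--         elif hasMid:
--             out.append("B")
--         else:
--             out.append(None)
--     return out
-- ===== Notes on version B (the rewrite author's own statement) =====
-- stated objective: faster
-- what changed: Replaced A's three independent filter-and-count scans per sub-array with one single pass maintaining three presence booleans, applying the same priority afterwards.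
import Mathlib
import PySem

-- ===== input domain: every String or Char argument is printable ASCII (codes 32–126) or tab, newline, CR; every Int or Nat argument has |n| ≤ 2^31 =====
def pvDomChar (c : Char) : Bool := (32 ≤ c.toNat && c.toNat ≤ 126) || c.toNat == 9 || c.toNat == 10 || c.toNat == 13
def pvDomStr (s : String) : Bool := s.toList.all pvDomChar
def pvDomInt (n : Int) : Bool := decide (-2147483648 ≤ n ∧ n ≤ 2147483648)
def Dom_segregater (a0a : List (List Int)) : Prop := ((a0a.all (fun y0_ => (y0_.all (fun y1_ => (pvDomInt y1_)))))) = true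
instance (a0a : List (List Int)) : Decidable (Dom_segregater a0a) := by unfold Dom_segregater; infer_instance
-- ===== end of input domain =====

-- B replaces A's three filter-and-count scans per sub-array by one pass keeping three presence booleans (constant-factor speedup, no temporary lists).

-- ===== PORT A =====
-- per sub-array: three filtered counts, then the priority chain over them
def segregaterBody (arr : List Int) : Option String :=
  let category : Option String := none
  let lessThan4250 : Int := (arr.filter (fun x => x < 4250)).length
  let moreThan10000 : Int := (arr.filter (fun x => x > 10000)).length
  let commonFreq : Int := (arr.filter (fun x => 4250 ≤ x ∧ x ≤ 10000)).length
  if lessThan4250 > 0 then some "A"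
  else if moreThan10000 > 0 then some "C"
  else if commonFreq > 0 then some "B"
  else category

def segregater (a0a : List (List Int)) : List (Option String) :=
  a0a.foldl (fun acc arr => acc ++ [segregaterBody arr]) []

-- ===== PORT B =====
-- single pass over the sub-array maintaining (hasLow, hasHigh, hasMid)
def segregaterAltFlags (arr : List Int) : Bool × Bool × Bool :=
  arr.foldl (fun (f : Bool × Bool × Bool) x =>
    if x < 4250 then (true, f.2.1, f.2.2)
    else if x > 10000 then (f.1, true, f.2.2)
    else (f.1, f.2.1, true)) (false, false, false)

def segregater_alt (a0a : List (List Int)) : List (Option String) :=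
  a0a.foldl (fun acc arr =>
    let f := segregaterAltFlags arr
    acc ++ [if f.1 then some "A" else if f.2.1 then some "C" else if f.2.2 then some "B" else none]) []

-- ===== PRECONDITION & SPEC =====
def Spec_segregater (a0a : List (List Int)) (out : List (Option String)) : Prop := out = segregater_alt a0a
instance (a0a : List (List Int)) (out : List (Option String)) : Decidable (Spec_segregater a0a out) := by unfold Spec_segregater; infer_instance

-- ===== CLAIM (what is proved, stated in full; the proofs are below) =====
def Claim_equal_segregater : Prop := ∀ (a0a : List (List Int)), Dom_segregater a0a → Spec_segregater a0a (segregater a0a)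

-- ===== LEMMAS AND PROOFS =====

-- boolean predicates matching B's branch structure
def pLow (x : Int) : Bool := decide (x < 4250)
def pHigh (x : Int) : Bool := !pLow x && decide (x > 10000)
def pMid (x : Int) : Bool := !pLow x && !(decide (x > 10000))

theorem flags_aux (zs : List Int) : ∀ (a b c : Bool),
    List.foldl (fun (f : Bool × Bool × Bool) x =>
      if x < 4250 then (true, f.2.1, f.2.2)
      else if x > 10000 then (f.1, true, f.2.2)
      else (f.1, f.2.1, true)) (a, b, c) zs =
    (a || zs.any pLow, b || zs.any pHigh, c || zs.any pMid) := by
  induction zs with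
  | nil => simp
  | cons z zs ih =>
    intro a b c
    simp only [List.foldl_cons, List.any_cons]
    split_ifs with h1 h2 <;> rw [ih] <;>
      simp [pLow, pHigh, pMid, *]

theorem segregaterAltFlags_spec (arr : List Int) :
    segregaterAltFlags arr = (arr.any pLow, arr.any pHigh, arr.any pMid) := by
  unfold segregaterAltFlags
  rw [flags_aux]; simp

theorem filter_pos_iff (p : Int → Prop) [DecidablePred p] (arr : List Int) :
    (((arr.filter (fun x => decide (p x))).length : Int) > 0) ↔ ∃ x ∈ arr, p x := by
  rw [gt_iff_lt]
  constructor
  · intro h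
    have hne : arr.filter (fun x => decide (p x)) ≠ [] := by
      intro he; rw [he] at h; simp at h
    obtain ⟨x, hx⟩ := List.exists_mem_of_ne_nil _ hne
    obtain ⟨hm, hp⟩ := List.mem_filter.mp hx
    exact ⟨x, hm, by simpa using hp⟩
  · intro ⟨x, hm, hp⟩
    have : x ∈ arr.filter (fun x => decide (p x)) := List.mem_filter.mpr ⟨hm, by simpa using hp⟩
    exact_mod_cast List.length_pos_of_mem this

theorem body_eq (arr : List Int) :
    segregaterBody arr =
      (let f := segregaterAltFlags arr
       if f.1 then some "A" else if f.2.1 then some "C" else if f.2.2 then some "B" else none) := by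
  rw [segregaterAltFlags_spec]
  unfold segregaterBody
  by_cases hA : ∃ x ∈ arr, x < 4250
  · have h1 : arr.any pLow = true := by
      rw [List.any_eq_true]; obtain ⟨x, hm, hx⟩ := hA; exact ⟨x, hm, by simp [pLow, hx]⟩
    simp only [h1]
    rw [if_pos ((filter_pos_iff _ _).mpr hA)]
    simp
  · have h1 : arr.any pLow = false := by
      rw [List.any_eq_false]; intro x hm
      push Not at hA
      have hx := hA x hm
      simp [pLow]
      omega
    simp only [h1]
    rw [if_neg (by rw [filter_pos_iff]; exact hA)]
    by_cases hC : ∃ x ∈ arr, x > 10000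
    · have h2 : arr.any pHigh = true := by
        rw [List.any_eq_true]; obtain ⟨x, hm, hx⟩ := hC
        exact ⟨x, hm, by simp [pHigh, pLow, hx]; omega⟩
      simp only [h2]
      rw [if_pos (by rw [filter_pos_iff]; exact hC)]
      simp
    · have h2 : arr.any pHigh = false := by
        rw [List.any_eq_false]; intro x hm
        push Not at hC
        have hx := hC x hm
        simp [pHigh, pLow]
        omega
      simp only [h2]
      rw [if_neg (by rw [filter_pos_iff]; exact hC)]
      by_cases hB : ∃ x ∈ arr, 4250 ≤ x ∧ x ≤ 10000
      · have h3 : arr.any pMid = true := by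
          rw [List.any_eq_true]; obtain ⟨x, hm, hx⟩ := hB
          exact ⟨x, hm, by simp [pMid, pLow]; omega⟩
        simp only [h3]
        rw [if_pos (by rw [filter_pos_iff]; exact hB)]
        simp
      · have h3 : arr.any pMid = false := by
          rw [List.any_eq_false]; intro x hm
          push Not at hB
          have hx := hB x hm
          simp [pMid, pLow]
          omega
        simp only [h3]
        rw [if_neg (by rw [filter_pos_iff]; exact hB)]
        simp

theorem ports_eq (a0a : List (List Int)) : segregater a0a = segregater_alt a0a := by
  unfold segregater segregater_alt
  induction a0a using List.reverseRecOn with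
  | nil => rfl
  | append_singleton ys y ih =>
    simp only [List.foldl_append, List.foldl_cons, List.foldl_nil]
    rw [ih, body_eq]

-- ===== VERDICT (by name: the statement is the Claim_ definition above) =====
theorem segregater_spec : Claim_equal_segregater := by
  unfold Claim_equal_segregater
  intro a0a _
  unfold Spec_segregater
  exact ports_eq a0a
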